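-- pv_equiv track=rewrite | github.com/Jacobboni94/DailyProgrammer | 375.py | digitwiseAdd
-- ===== SOURCE A (Python) =====
-- def digitwiseAdd(myVar):
--     digits = []
--     myBool = True
--     i = 0
--     while myBool:
--         digits.insert(i, myVar%10)
--         myVar = myVar - myVar%10
--         myVar = myVar // 10
--         i += 1
--         if myVar == 0 :
--             myBool = False
--
--     ans = 0
--     for i in range(0, len(digits)) :
--         digits[i] += 1
--         ans += digits[i] * 10**i
--
--     return ans
-- ===== SOURCE B (Python) =====
-- def digitwiseAdd(myVar):
--     # Closed form: adding 1 to every decimal place value of myVar adds the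
--     # repunit with as many 1s as myVar has digits.
--     n = len(str(myVar))
--     return myVar + (10 ** n - 1) // 9
-- ===== Notes on version B (the rewrite author's own statement) =====
-- stated objective: simpler
-- what changed: B replaces A's two loops (extract digits into a list, then increment and re-assemble them place by place) with a closed form: myVar plus the repunit that has one 'one' digit per decimal digit of myVar, computed from the digit count len(str(myVar)).
import Mathlib
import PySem

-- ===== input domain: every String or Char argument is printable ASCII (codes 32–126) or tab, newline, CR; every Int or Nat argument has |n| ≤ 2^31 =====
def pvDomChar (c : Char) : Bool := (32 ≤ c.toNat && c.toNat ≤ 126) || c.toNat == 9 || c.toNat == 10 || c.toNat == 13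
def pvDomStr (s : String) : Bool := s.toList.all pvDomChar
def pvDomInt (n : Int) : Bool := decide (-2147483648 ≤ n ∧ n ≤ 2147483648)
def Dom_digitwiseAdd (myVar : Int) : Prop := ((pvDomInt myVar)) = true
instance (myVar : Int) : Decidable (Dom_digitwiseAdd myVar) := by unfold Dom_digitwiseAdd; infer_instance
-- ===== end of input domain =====

-- B replaces A's digit-extract / increment-and-rebuild loops by the closed form
-- myVar + repunit(number of decimal digits); objective: simpler. Equivalence is on
-- 0 ≤ myVar (Pre_): A's while loop never terminates on negative input.


-- ===== PORT A =====
-- A's while loop; the fuel only makes it total in Lean (Python diverges on negative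
-- myVar, excluded by Pre_; fuel myVar.toNat + 1 is enough for every 0 ≤ myVar)
def digitwiseAddLoop : Nat → Int → List Int → Int → List Int
  | 0, _, digits, _ => digits
  | fuel + 1, myVar, digits, i =>
    let digits' := PySem.List.insert digits i (PySem.Int.mod myVar 10)
    let v1 := myVar - PySem.Int.mod myVar 10
    let v2 := PySem.Int.floordiv v1 10
    if v2 = 0 then digits' else digitwiseAddLoop fuel v2 digits' (i + 1)

def digitwiseAdd (myVar : Int) : Int :=
  let digits := digitwiseAddLoop (myVar.toNat + 1) myVar [] 0
  ((PySem.List.pyRange 0 (PySem.List.len digits) 1).foldl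
    (fun (st : List Int × Int) i =>
      let ds := PySem.List.pySetD st.1 i (PySem.List.pyGetD st.1 i 0 + 1)
      (ds, st.2 + PySem.List.pyGetD ds i 0 * 10 ^ i.toNat))
    (digits, 0)).2

-- ===== PORT B =====
def digitwiseAdd_alt (myVar : Int) : Int :=
  let n := PySem.Str.len (PySem.Int.toStr myVar)
  myVar + PySem.Int.floordiv (10 ^ n.toNat - 1) 9

-- ===== PRECONDITION & SPEC =====
-- Pre_ excludes exactly the negative inputs: there A's while loop never terminates.
def Pre_digitwiseAdd (myVar : Int) : Prop := 0 ≤ myVar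
instance (myVar : Int) : Decidable (Pre_digitwiseAdd myVar) := by unfold Pre_digitwiseAdd; infer_instance
def pvWitness_digitwiseAdd : Int := (42)

def Spec_digitwiseAdd (myVar : Int) (out : Int) : Prop := out = digitwiseAdd_alt myVar
instance (myVar : Int) (out : Int) : Decidable (Spec_digitwiseAdd myVar out) := by unfold Spec_digitwiseAdd; infer_instance

-- ===== CLAIM (what is proved, stated in full; the proofs are below) =====
def Claim_equal_digitwiseAdd : Prop := ∀ (myVar : Int), Dom_digitwiseAdd myVar → Pre_digitwiseAdd myVar → Spec_digitwiseAdd myVar (digitwiseAdd myVar)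

-- ===== LEMMAS AND PROOFS =====

-- decimal digits of n, least significant first ([n] itself for n < 10): what A's
-- first loop appends to `digits`
def pvDlist (n : Nat) : List Int :=
  if h : n < 10 then [(n : Int)] else ((n % 10 : Nat) : Int) :: pvDlist (n / 10)
  decreasing_by exact Nat.div_lt_self (by omega) (by omega)

-- repunit with k ones
def pvRep : Nat → Int
  | 0 => 0
  | k + 1 => 10 * pvRep k + 1

-- value accumulated by A's second loop over a digit list
def pvSumPlace : List Int → Int
  | [] => 0
  | d :: ds => (d + 1) + 10 * pvSumPlace ds

lemma pvLoopA_eq : ∀ (f n : Nat) (acc : List Int), n < f →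
    digitwiseAddLoop f (n : Int) acc (acc.length : Int) = acc ++ pvDlist n := by
  intro f
  induction f with
  | zero => intro n acc h; omega
  | succ f ih =>
    intro n acc h
    rw [digitwiseAddLoop]
    have hmod : PySem.Int.mod (n : Int) 10 = ((n % 10 : Nat) : Int) :=
      PySem.Int.mod_natCast n 10
    have hsub : (n : Int) - ((n % 10 : Nat) : Int) = ((n - n % 10 : Nat) : Int) := by
      push_cast [Nat.mod_le]; ring
    have hdiv : PySem.Int.floordiv ((n - n % 10 : Nat) : Int) 10 = ((n / 10 : Nat) : Int) := by
      have h1 : PySem.Int.floordiv ((n - n % 10 : Nat) : Int) ((10 : Nat) : Int)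
          = (((n - n % 10) / 10 : Nat) : Int) := PySem.Int.floordiv_natCast _ _
      have h2 : (n - n % 10) / 10 = n / 10 := by omega
      rw [h2] at h1
      exact_mod_cast h1
    have hins : PySem.List.insert acc ((acc.length : Nat) : Int) (((n % 10 : Nat)) : Int)
        = acc ++ [((n % 10 : Nat) : Int)] := by
      rw [PySem.List.insert_natCast acc acc.length _ (le_refl _)]
      simp
    simp only [hmod, hins, hsub, hdiv]
    by_cases h10 : n < 10
    · have : n / 10 = 0 := by omega
      rw [this]
      simp only [Nat.cast_zero]
      have hmn : n % 10 = n := by omega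
      rw [hmn, pvDlist, dif_pos h10]
      simp
    · have hne : ((n / 10 : Nat) : Int) ≠ 0 := by
        have : n / 10 ≠ 0 := by omega
        exact_mod_cast this
      rw [if_neg hne]
      have hlen : ((acc ++ [((n % 10 : Nat) : Int)]).length : Int) = (acc.length : Int) + 1 := by
        simp
      rw [← hlen, ih (n / 10) _ (by omega)]
      conv_rhs => rw [pvDlist]
      rw [dif_neg h10]
      simp

lemma pvFold2 : ∀ (ds pre : List Int) (ans : Int),
    ((PySem.List.pyRange (pre.length : Int) ((pre.length + ds.length : Nat) : Int) 1).foldl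
      (fun (st : List Int × Int) i =>
        let l := PySem.List.pySetD st.1 i (PySem.List.pyGetD st.1 i 0 + 1)
        (l, st.2 + PySem.List.pyGetD l i 0 * 10 ^ i.toNat))
      (pre ++ ds, ans)).2 = ans + 10 ^ pre.length * pvSumPlace ds := by
  intro ds
  induction ds with
  | nil =>
    intro pre ans
    simp [pvSumPlace]
  | cons d tl ih =>
    intro pre ans
    have hlt : (pre.length : Int) < ((pre.length + (d :: tl).length : Nat) : Int) := by
      exact_mod_cast (by simp : pre.length < pre.length + (d :: tl).length)
    rw [PySem.List.pyRange_one_cons hlt, List.foldl_cons]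
    have hget : PySem.List.pyGetD (pre ++ d :: tl) (pre.length : Int) 0 = d := by
      simp [List.getD]
    have hset : PySem.List.pySetD (pre ++ d :: tl) (pre.length : Int) (d + 1)
        = pre ++ (d + 1) :: tl := by
      simp
    have hget2 : PySem.List.pyGetD (pre ++ (d + 1) :: tl) (pre.length : Int) 0 = d + 1 := by
      simp [List.getD]
    simp only [hget, hset, hget2]
    have hre : pre ++ (d + 1) :: tl = (pre ++ [d + 1]) ++ tl := by simp
    have hidx : (pre.length : Int) + 1 = (((pre ++ [d + 1]).length : Nat) : Int) := by
      simp
    have hstop : ((pre.length + (d :: tl).length : Nat) : Int)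
        = (((pre ++ [d + 1]).length + tl.length : Nat) : Int) := by
      simp; omega
    rw [hre, hidx, hstop, ih]
    simp [pvSumPlace]
    ring

lemma pvSumPlace_dlist (n : Nat) :
    pvSumPlace (pvDlist n) = (n : Int) + pvRep (pvDlist n).length := by
  induction n using Nat.strong_induction_on with
  | _ n ih =>
    rw [pvDlist]
    by_cases h : n < 10
    · simp [h, pvSumPlace, pvRep]
    · rw [dif_neg h]
      simp only [pvSumPlace, List.length_cons, ih (n / 10) (Nat.div_lt_self (by omega) (by omega)),
        pvRep]
      have : (n : Int) = ((n % 10 : Nat) : Int) + 10 * ((n / 10 : Nat) : Int) := by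
        push_cast
        omega
      rw [this]
      ring

lemma pvRep_closed (L : Nat) : PySem.Int.floordiv (10 ^ L - 1) 9 = pvRep L := by
  have h9 : (9 : Int) * pvRep L = 10 ^ L - 1 := by
    induction L with
    | zero => simp [pvRep]
    | succ k ih => rw [pvRep]; push_cast [pow_succ]; linarith
  rw [← h9, PySem.Int.floordiv_eq_ediv_of_pos (by norm_num)]
  exact Int.mul_ediv_cancel_left _ (by norm_num)

lemma pvLen_toDigitsCore : ∀ (f n : Nat) (l : List Char), n < f →
    (Nat.toDigitsCore 10 f n l).length = (pvDlist n).length + l.length := by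
  intro f
  induction f with
  | zero => intro n l h; omega
  | succ f ih =>
    intro n l h
    rw [Nat.toDigitsCore]
    by_cases h10 : n < 10
    · have : n / 10 = 0 := by omega
      rw [if_pos this, pvDlist, dif_pos h10]
      simp
      omega
    · have hne : ¬ n / 10 = 0 := by omega
      rw [if_neg hne, ih (n / 10) _ (by omega)]
      conv_rhs => rw [pvDlist]
      rw [dif_neg h10]
      simp
      omega

lemma pvLen_toChars (n : Nat) :
    (PySem.Int.toChars (n : Int)).length = (pvDlist n).length := by
  rw [PySem.Int.toChars]
  rw [if_neg (by omega : ¬ (n : Int) < 0)]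
  have : (n : Int).toNat = n := by omega
  rw [this, Nat.toDigits]
  rw [pvLen_toDigitsCore (n + 1) n [] (by omega)]
  simp

-- ===== VERDICT (by name: the statement is the Claim_ definition above) =====
theorem digitwiseAdd_spec : Claim_equal_digitwiseAdd := by
  intro myVar _ hPre
  unfold Spec_digitwiseAdd
  obtain ⟨n, rfl⟩ : ∃ n : Nat, myVar = (n : Int) := ⟨myVar.toNat, (Int.toNat_of_nonneg hPre).symm⟩
  unfold digitwiseAdd digitwiseAdd_alt
  -- A's first loop produces the digit list
  have hloop : digitwiseAddLoop ((n : Int).toNat + 1) (n : Int) [] 0 = pvDlist n := by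
    have h := pvLoopA_eq (n + 1) n [] (by omega)
    simpa using h
  -- A's second loop accumulates pvSumPlace over it
  have hfold := pvFold2 (pvDlist n) [] 0
  simp only [List.length_nil, Nat.cast_zero, List.nil_append, pow_zero,
    one_mul, zero_add] at hfold
  rw [hloop]
  dsimp only
  rw [show PySem.List.len (pvDlist n) = ((pvDlist n).length : Int) from PySem.List.len_eq _]
  rw [hfold, pvSumPlace_dlist n]
  -- B's side: len(str n) is the same digit count
  have hlen : PySem.Str.len (PySem.Int.toStr (n : Int)) = ((pvDlist n).length : Int) := by
    rw [PySem.Str.len]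
    rw [PySem.Int.toList_toStr, pvLen_toChars]
  rw [hlen]
  have : (((pvDlist n).length : Int)).toNat = (pvDlist n).length := by omega
  rw [this, pvRep_closed]
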